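-- pv_equiv track=rewrite | github.com/kanikagarg/CodePracticeDSA | suffix_count.py | suffixCount
-- ===== SOURCE A (Python) =====
-- def suffixCount (N, A, Q, B):
--     count = []
--     for i in range(0,Q):
--         suffix_count =0
--         for  j in range(0,N):
--             if A[j][(len(A[j])-len(B[i])):] == B[i]:
--                 suffix_count =suffix_count+1
--         count.append(suffix_count)
--     return count
-- ===== SOURCE B (Python) =====
-- def suffixCount(N, A, Q, B):
--     if N <= 0 or Q <= 0:
--         return [0] * Q
--     counts = {}
--     for j in range(N):
--         s = A[j]
--         for k in range(len(s) + 1):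
--             counts[s[k:]] = counts.get(s[k:], 0) + 1
--     return [counts.get(B[i], 0) for i in range(Q)]
-- ===== Notes on version B (the rewrite author's own statement) =====
-- stated objective: faster
-- what changed: Instead of scanning all N strings for every query (slice-compare each), B builds a dictionary counting every suffix of A's first N strings once and answers each query by a single dict lookup (with a zero/empty fast path for N<=0 or Q<=0).
import Mathlib
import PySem

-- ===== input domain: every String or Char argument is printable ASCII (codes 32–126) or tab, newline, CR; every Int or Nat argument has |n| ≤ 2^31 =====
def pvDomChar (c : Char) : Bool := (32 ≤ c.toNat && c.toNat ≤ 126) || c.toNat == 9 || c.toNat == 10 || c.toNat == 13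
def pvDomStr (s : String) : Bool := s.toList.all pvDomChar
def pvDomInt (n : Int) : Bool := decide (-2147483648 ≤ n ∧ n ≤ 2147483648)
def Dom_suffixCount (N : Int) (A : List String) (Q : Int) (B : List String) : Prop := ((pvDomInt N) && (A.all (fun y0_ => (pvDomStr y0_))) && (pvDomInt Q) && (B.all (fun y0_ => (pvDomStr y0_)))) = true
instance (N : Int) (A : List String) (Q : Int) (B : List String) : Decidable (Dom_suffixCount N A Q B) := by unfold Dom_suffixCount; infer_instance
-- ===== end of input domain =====

-- B replaces A's per-query scan over all N strings by a suffix-count dictionary built once;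
-- each query is then a single lookup (objective: faster, asymptotic).

-- ===== PORT A =====
def suffixCount (N : Int) (A : List String) (Q : Int) (B : List String) : List Int :=
  (PySem.List.pyRange 0 Q 1).foldl (fun count i =>
    let b := PySem.List.pyGetD B i ""
    let sc := (PySem.List.pyRange 0 N 1).foldl (fun sc j =>
      let s := PySem.List.pyGetD A j ""
      if PySem.Str.slice s (some (PySem.Str.len s - PySem.Str.len b)) none == b
      then sc + 1 else sc) 0
    count ++ [sc]) []

-- ===== PORT B =====
def suffixCount_alt (N : Int) (A : List String) (Q : Int) (B : List String) : List Int :=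
  if N ≤ 0 ∨ Q ≤ 0 then List.replicate Q.toNat 0
  else
    let counts := (PySem.List.pyRange 0 N 1).foldl (fun d j =>
      let s := PySem.List.pyGetD A j ""
      (PySem.List.pyRange 0 (PySem.Str.len s + 1) 1).foldl (fun d k =>
        let suf := PySem.Str.slice s (some k) none
        d.insert suf (d.getD suf 0 + 1)) d) PySem.Dict.empty
    (PySem.List.pyRange 0 Q 1).map (fun i => counts.getD (PySem.List.pyGetD B i "") 0)

-- ===== PRECONDITION & SPEC =====
-- Pre_ excludes exactly the inputs on which Python A raises IndexError (0 < N with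
-- len(A) < N, or 0 < N and 0 < Q with len(B) < Q: the loops index A[j] and B[i] out of
-- range); B raises IndexError on exactly the same inputs.
def Pre_suffixCount (N : Int) (A : List String) (Q : Int) (B : List String) : Prop :=
  Q ≤ 0 ∨ N ≤ 0 ∨ (N ≤ (A.length : Int) ∧ Q ≤ (B.length : Int))
instance (N : Int) (A : List String) (Q : Int) (B : List String) : Decidable (Pre_suffixCount N A Q B) := by unfold Pre_suffixCount; infer_instance

def pvWitness_suffixCount : Int × List String × Int × List String :=
  (3, ["ab", "b", "cab"], 2, ["b", "ab"])

def Spec_suffixCount (N : Int) (A : List String) (Q : Int) (B : List String) (out : List Int) : Prop := out = suffixCount_alt N A Q B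
instance (N : Int) (A : List String) (Q : Int) (B : List String) (out : List Int) : Decidable (Spec_suffixCount N A Q B out) := by unfold Spec_suffixCount; infer_instance

-- ===== CLAIM (what is proved, stated in full; the proofs are below) =====
def Claim_equal_suffixCount : Prop := ∀ (N : Int) (A : List String) (Q : Int) (B : List String), Dom_suffixCount N A Q B → Pre_suffixCount N A Q B → Spec_suffixCount N A Q B (suffixCount N A Q B)

-- ===== LEMMAS AND PROOFS =====

-- A's per-string test: A[j][(len(A[j])-len(B[i])):] == B[i]
def condA (b s : String) : Bool :=
  PySem.Str.slice s (some (PySem.Str.len s - PySem.Str.len b)) none == b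

-- the list of suffix slices of s, as B's inner loop produces them, contains each
-- query b once iff A's test accepts (s, b), else not at all
lemma count_suffix_slices (s b : String) :
    List.count b ((List.range (s.toList.length + 1)).map
        (fun k => PySem.Str.slice s (some ((k : Nat) : Int)) none))
      = if condA b s then 1 else 0 := by
  set m := s.toList.length with hm
  set q := b.toList.length with hq
  have htl : ∀ k : Nat, (PySem.Str.slice s (some ((k : Nat) : Int)) none).toList = s.toList.drop k := by
    intro k
    rw [PySem.Str.toList_slice, PySem.Chars.slice_eq_listSlice,
      PySem.List.slice_from _ (by exact_mod_cast Nat.zero_le k)]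
    simp
  have hnd : ((List.range (m + 1)).map
      (fun k => PySem.Str.slice s (some ((k : Nat) : Int)) none)).Nodup := by
    apply List.Nodup.map_on _ List.nodup_range
    intro x hx y hy hf
    have h1 := congrArg String.toList hf
    rw [htl x, htl y] at h1
    have h2 := congrArg List.length h1
    simp only [List.length_drop] at h2
    simp only [List.mem_range] at hx hy
    omega
  by_cases hqm : q ≤ m
  · have hstart : PySem.Str.len s - PySem.Str.len b = ((m - q : Nat) : Int) := by
      simp only [PySem.Str.len_eq, ← hm, ← hq]; omega
    have hcond : condA b s = true ↔ s.toList.drop (m - q) = b.toList := by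
      unfold condA
      rw [hstart, beq_iff_eq, ← String.toList_inj, htl (m - q)]
    by_cases hc : condA b s = true
    · have hbmem : b ∈ (List.range (m + 1)).map
          (fun k => PySem.Str.slice s (some ((k : Nat) : Int)) none) := by
        refine List.mem_map.mpr ⟨m - q, List.mem_range.mpr (by omega), ?_⟩
        rw [← String.toList_inj, htl (m - q)]
        exact hcond.mp hc
      rw [if_pos hc]
      exact List.count_eq_one_of_mem hnd hbmem
    · have hbnmem : b ∉ (List.range (m + 1)).map
          (fun k => PySem.Str.slice s (some ((k : Nat) : Int)) none) := by
        intro hmem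
        obtain ⟨k, hk, hfk⟩ := List.mem_map.mp hmem
        have h1 : s.toList.drop k = b.toList := by rw [← htl k, hfk]
        have h2 := congrArg List.length h1
        simp only [List.length_drop, ← hq] at h2
        simp only [List.mem_range] at hk
        have hkq : k = m - q := by omega
        exact hc (hcond.mpr (hkq ▸ h1))
      rw [if_neg hc]
      exact List.count_eq_zero_of_not_mem hbnmem
  · have hlen_any : ∀ a : Int, ((PySem.Str.slice s (some a) none).toList).length ≤ m := by
      intro a
      rw [PySem.Str.toList_slice, PySem.Chars.slice_eq_listSlice, PySem.List.slice_some_none]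
      simp only [List.length_drop]
      omega
    have hc : ¬ condA b s = true := by
      intro hc
      unfold condA at hc
      rw [beq_iff_eq, ← String.toList_inj] at hc
      have := congrArg List.length hc
      have h2 := hlen_any (PySem.Str.len s - PySem.Str.len b)
      omega
    have hbnmem : b ∉ (List.range (m + 1)).map
        (fun k => PySem.Str.slice s (some ((k : Nat) : Int)) none) := by
      intro hmem
      obtain ⟨k, hk, hfk⟩ := List.mem_map.mp hmem
      have h1 : s.toList.drop k = b.toList := by rw [← htl k, hfk]
      have h2 := congrArg List.length h1
      simp only [List.length_drop, ← hq] at h2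
      omega
    rw [if_neg hc]
    exact List.count_eq_zero_of_not_mem hbnmem

-- one string s adds 1 to the dictionary count of query b iff A's test accepts (s, b)
lemma step_getD (s : String) (d : PySem.Dict String Int) (b : String) :
    ((PySem.List.pyRange 0 (PySem.Str.len s + 1) 1).foldl (fun d k =>
        d.insert (PySem.Str.slice s (some k) none)
          ((d.getD (PySem.Str.slice s (some k) none) 0) + 1)) d).getD b 0
      = d.getD b 0 + (if condA b s then 1 else 0) := by
  have hs : (PySem.Str.len s + 1) = ((s.toList.length + 1 : Nat) : Int) := by
    rw [PySem.Str.len_eq]; push_cast; ring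
  rw [hs, PySem.List.pyRange_zero_natCast, List.foldl_map]
  have h := PySem.Dict.getD_foldl_insert_add_one
    ((List.range (s.toList.length + 1)).map
      (fun k => PySem.Str.slice s (some ((k : Nat) : Int)) none)) d b
  rw [List.foldl_map] at h
  rw [h, count_suffix_slices]
  by_cases hc : condA b s = true <;> simp [hc]

-- building the dictionary over the indices js adds, for each query b, the number of
-- indexed strings having b as suffix in the sense of A's test
lemma getD_build (js : List Int) (A : List String) (d : PySem.Dict String Int) (b : String) :
    ((js.foldl (fun d j =>
        (PySem.List.pyRange 0 (PySem.Str.len (PySem.List.pyGetD A j "") + 1) 1).foldl (fun d k =>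
          d.insert (PySem.Str.slice (PySem.List.pyGetD A j "") (some k) none)
            ((d.getD (PySem.Str.slice (PySem.List.pyGetD A j "") (some k) none) 0) + 1)) d) d).getD b 0)
      = d.getD b 0 + (js.countP (fun j => condA b (PySem.List.pyGetD A j "")) : Int) := by
  induction js generalizing d with
  | nil => simp
  | cons j js ih =>
    rw [List.foldl_cons, ih, step_getD, List.countP_cons]
    by_cases hc : condA b (PySem.List.pyGetD A j "") = true <;> simp [hc] <;> omega

-- ===== VERDICT (by name: the statement is the Claim_ definition above) =====
theorem suffixCount_spec : Claim_equal_suffixCount := by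
  intro N A Q B _hdom _hpre
  unfold Spec_suffixCount suffixCount suffixCount_alt
  by_cases hQ : Q ≤ 0
  · rw [PySem.List.pyRange_one_eq_nil hQ, if_pos (Or.inr hQ)]
    simp [Int.toNat_of_nonpos hQ]
  · rw [PySem.List.foldl_append_singleton_eq_map]
    simp only [List.nil_append]
    by_cases hN : N ≤ 0
    · rw [if_pos (Or.inl hN), PySem.List.pyRange_one_eq_nil hN]
      simp only [List.foldl_nil]
      rw [List.map_const', PySem.List.length_pyRange_one]
      congr 1
      omega
    · rw [if_neg (by tauto)]
      apply List.map_congr_left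
      intro i _hi
      set b := PySem.List.pyGetD B i "" with hb
      rw [show (fun sc j =>
          let s := PySem.List.pyGetD A j "";
          if PySem.Str.slice s (some (PySem.Str.len s - PySem.Str.len b)) none == b
          then sc + 1 else sc)
        = (fun (sc : Int) j => if condA b (PySem.List.pyGetD A j "") then sc + 1 else sc) from rfl]
      rw [PySem.List.foldl_if_add_one (fun j => condA b (PySem.List.pyGetD A j "")) _ 0]
      rw [getD_build, PySem.Dict.getD_empty]
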